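-- pv_equiv track=rewrite | github.com/iscc/iscc-experiments | iscc_bench/elastic_search/generate_image_hashes.py | wavelet2d
-- ===== SOURCE A (Python) =====
-- def wavelet2d(data):
--     N = int(len(data) / 2)
--     while N > 1:
--         # cut vertical
--         for j, row in enumerate(data):
--             output = [entry for entry in row]
--             for i in range(N):
--                 output[i] = row[2 * i] + row[2 * i + 1]
--                 output[i + N] = row[2 * i] - row[2 * i + 1]
--             data[j] = output
--         # cut horizontal
--         data_t = list(map(list, zip(*data)))
--         for j, row in enumerate(data_t):
--             output = [entry for entry in row]
--             for i in range(N):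
--                 output[i] = row[2 * i] + row[2 * i + 1]
--                 output[i + N] = row[2 * i] - row[2 * i + 1]
--             data_t[j] = output
--         data = list(map(list, zip(*data_t)))
--
--         N = int(N / 2)
--     return data
-- ===== SOURCE B (Python) =====
-- def wavelet2d(data):
--     # Index-based rewrite: per level, transform every row functionally and do the
--     # column pass by pairing rows directly, eliminating the two zip-transposes.
--     # (A mutates the rows of its argument in place on the first level; B does not —
--     # the equivalence is about the return value.)
--     def step(v, N):
--         head = v[:2 * N]
--         sums = [head[2 * i] + head[2 * i + 1] for i in range(N)]
--         diffs = [head[2 * i] - head[2 * i + 1] for i in range(N)]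
--         return sums + diffs + v[2 * N:]
--
--     rows = [list(r) for r in data]
--     N = len(rows) // 2
--     while N > 1:
--         rows = [step(r, N) for r in rows]
--         m = len(rows[0])
--         new_rows = []
--         for j in range(len(rows)):
--             if j < N:
--                 a, b = rows[2 * j], rows[2 * j + 1]
--                 new_rows.append([a[i] + b[i] for i in range(m)])
--             elif j < 2 * N:
--                 k = j - N
--                 a, b = rows[2 * k], rows[2 * k + 1]
--                 new_rows.append([a[i] - b[i] for i in range(m)])
--             else:
--                 new_rows.append(rows[j])
--         rows = new_rows
--         N //= 2
--     return rows
-- ===== Notes on version B (the rewrite author's own statement) =====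
-- stated objective: faster
-- what changed: Per level, B transforms each row functionally and performs the column pass by combining pairs of rows directly with index arithmetic, eliminating A's two zip-based transposes and per-row copy-then-mutate passes.
import Mathlib
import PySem

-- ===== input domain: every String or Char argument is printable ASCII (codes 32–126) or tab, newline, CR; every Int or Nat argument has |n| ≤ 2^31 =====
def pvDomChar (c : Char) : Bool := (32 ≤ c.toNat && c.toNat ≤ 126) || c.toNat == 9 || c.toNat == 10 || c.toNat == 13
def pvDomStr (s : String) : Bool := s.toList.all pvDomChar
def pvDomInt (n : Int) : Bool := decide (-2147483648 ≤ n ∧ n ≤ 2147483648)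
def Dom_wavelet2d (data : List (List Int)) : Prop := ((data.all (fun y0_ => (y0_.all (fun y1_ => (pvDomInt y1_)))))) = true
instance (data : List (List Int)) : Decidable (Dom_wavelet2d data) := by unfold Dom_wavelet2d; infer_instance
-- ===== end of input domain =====

-- B replaces A's two zip-transposes per level by a direct pairwise combination of rows
-- (constant-factor faster as measured); A mutates its argument's rows in place on the
-- first level while B does not — the equivalence proved here is about the return value.

-- ===== PORT A =====
-- inner 'for i in range(N)' loop over a copied row, writing output[i] and output[i+N]
def aRowStep (N : Nat) (row : List Int) : List Int :=
  (List.range N).foldl (fun out i =>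
    (out.set i (row.getD (2*i) 0 + row.getD (2*i+1) 0)).set (i+N)
      (row.getD (2*i) 0 - row.getD (2*i+1) 0)) row

-- list(map(list, zip(*xss))): transpose truncated to the shortest row (exact for Int entries)
def pyTranspose (xss : List (List Int)) : List (List Int) :=
  (List.range (((xss.map List.length).min?).getD 0)).map (fun i => xss.map (fun r => r.getD i 0))

-- the 'while N > 1' loop of A
def aLoop (data : List (List Int)) (N : Nat) : List (List Int) :=
  if 1 < N then
    aLoop (pyTranspose ((pyTranspose (data.map (aRowStep N))).map (aRowStep N))) (N / 2)
  else data
termination_by N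
decreasing_by omega

def wavelet2d (data : List (List Int)) : List (List Int) :=
  aLoop data (data.length / 2)

-- ===== PORT B =====
-- Source B's step(v, N): sums ++ diffs ++ untouched tail
def bStep (N : Nat) (v : List Int) : List Int :=
  (List.range N).map (fun i => (v.take (2*N)).getD (2*i) 0 + (v.take (2*N)).getD (2*i+1) 0)
  ++ (List.range N).map (fun i => (v.take (2*N)).getD (2*i) 0 - (v.take (2*N)).getD (2*i+1) 0)
  ++ v.drop (2*N)

-- Source B's column pass: pair rows directly by index, no transpose
def bCols (rows : List (List Int)) (N : Nat) : List (List Int) :=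
  (List.range rows.length).map (fun j =>
    if j < N then
      (List.range (rows.headD []).length).map
        (fun i => (rows.getD (2*j) []).getD i 0 + (rows.getD (2*j+1) []).getD i 0)
    else if j < 2*N then
      (List.range (rows.headD []).length).map
        (fun i => (rows.getD (2*(j-N)) []).getD i 0 - (rows.getD (2*(j-N)+1) []).getD i 0)
    else rows.getD j [])

-- Source B's 'while N > 1' loop
def bLoop (rows : List (List Int)) (N : Nat) : List (List Int) :=
  if 1 < N then bLoop (bCols (rows.map (bStep N)) N) (N / 2) else rows
termination_by N
decreasing_by omega

def wavelet2d_alt (data : List (List Int)) : List (List Int) :=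
  bLoop data (data.length / 2)

-- ===== PRECONDITION & SPEC =====
-- When the loop runs (4 ≤ n) A needs every row to have the same length (zip-transposing a
-- ragged matrix silently truncates it, an artefact; see cites) of at least 2*(n/2)
-- (a shorter row raises IndexError). With n < 4 the loop never runs and nothing is required.
def Pre_wavelet2d (data : List (List Int)) : Prop :=
  4 ≤ data.length →
    (∀ r ∈ data, r.length = (data.headD []).length) ∧
      2 * (data.length / 2) ≤ (data.headD []).length
instance (data : List (List Int)) : Decidable (Pre_wavelet2d data) := by
  unfold Pre_wavelet2d; infer_instance

def pvWitness_wavelet2d : List (List Int) :=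
  [[1, 2, 3, 4], [5, 6, 7, 8], [9, 10, 11, 12], [13, 14, 15, 16]]

def Spec_wavelet2d (data : List (List Int)) (out : List (List Int)) : Prop := out = wavelet2d_alt data
instance (data : List (List Int)) (out : List (List Int)) : Decidable (Spec_wavelet2d data out) := by unfold Spec_wavelet2d; infer_instance

-- ===== CLAIM (what is proved, stated in full; the proofs are below) =====
def Claim_equal_wavelet2d : Prop := ∀ (data : List (List Int)), Dom_wavelet2d data → Pre_wavelet2d data → Spec_wavelet2d data (wavelet2d data)

-- ===== LEMMAS AND PROOFS =====
theorem getD_set (l : List Int) (i k : Nat) (a : Int) :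
    (l.set i a).getD k 0 = if i = k ∧ i < l.length then a else l.getD k 0 := by
  by_cases hik : i = k
  · subst hik
    by_cases hl : i < l.length
    · simp [List.getD_eq_getElem?_getD, hl]
    · rw [List.set_eq_of_length_le (by omega)]
      simp [hl]
  · simp [List.getD_eq_getElem?_getD, List.getElem?_set_ne hik, hik]

theorem aRowStep_aux (N : Nat) (row : List Int) (h : 2*N ≤ row.length) (j : Nat) (hj : j ≤ N) :
    ((List.range j).foldl (fun out i =>
    (out.set i (row.getD (2*i) 0 + row.getD (2*i+1) 0)).set (i+N)
      (row.getD (2*i) 0 - row.getD (2*i+1) 0)) row).length = row.length ∧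
    ∀ k, ((List.range j).foldl (fun out i =>
    (out.set i (row.getD (2*i) 0 + row.getD (2*i+1) 0)).set (i+N)
      (row.getD (2*i) 0 - row.getD (2*i+1) 0)) row).getD k 0 =
      if k < j then row.getD (2*k) 0 + row.getD (2*k+1) 0
      else if N ≤ k ∧ k < N + j then row.getD (2*(k-N)) 0 - row.getD (2*(k-N)+1) 0
      else row.getD k 0 := by
  induction j with
  | zero => simp
  | succ j ih =>
    obtain ⟨ihl, ihg⟩ := ih (by omega)
    rw [List.range_succ, List.foldl_append]
    simp only [List.foldl_cons, List.foldl_nil]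
    refine ⟨by rw [List.length_set, List.length_set]; exact ihl, ?_⟩
    intro k
    rw [getD_set, getD_set]
    simp only [List.length_set]
    simp only [ihl]
    rw [ihg k]
    have hc := ihl
    by_cases h1 : j + N = k
    · subst h1
      simp only [show j + N - N = j from by omega, true_and]
      split_ifs <;> first | rfl | omega
    · by_cases h2 : j = k
      · subst h2
        split_ifs <;> first | rfl | omega
      · by_cases h3 : k < j
        · split_ifs <;> first | rfl | omega
        · by_cases h4 : N ≤ k ∧ k < N + j
          · split_ifs <;> first | rfl | omega
          · split_ifs <;> first | rfl | omega

theorem getD_take (v : List Int) (n i : Nat) (h : i < n) :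
    (v.take n).getD i 0 = v.getD i 0 := by
  simp [List.getD_eq_getElem?_getD, List.getElem?_take, h]

theorem bStep_length (N : Nat) (v : List Int) (h : 2*N ≤ v.length) :
    (bStep N v).length = v.length := by
  simp [bStep]; omega

theorem mapRange_getElem? (N k : Nat) (f : Nat → Int) (h : k < N) :
    ((List.range N).map f)[k]? = some (f k) := by
  simp [List.getElem?_map, List.getElem?_range, h]

theorem bStep_getD (N : Nat) (v : List Int) (h : 2*N ≤ v.length) (k : Nat) (hk : k < v.length) :
    (bStep N v).getD k 0 =
      if k < N then v.getD (2*k) 0 + v.getD (2*k+1) 0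
      else if k < 2*N then v.getD (2*(k-N)) 0 - v.getD (2*(k-N)+1) 0
      else v.getD k 0 := by
  unfold bStep
  have hmap1 : (List.range N).map (fun i => (v.take (2*N)).getD (2*i) 0 + (v.take (2*N)).getD (2*i+1) 0)
      = (List.range N).map (fun i => v.getD (2*i) 0 + v.getD (2*i+1) 0) := by
    refine List.map_congr_left ?_
    intro a ha
    rw [List.mem_range] at ha
    rw [getD_take _ _ _ (by omega), getD_take _ _ _ (by omega)]
  have hmap2 : (List.range N).map (fun i => (v.take (2*N)).getD (2*i) 0 - (v.take (2*N)).getD (2*i+1) 0)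
      = (List.range N).map (fun i => v.getD (2*i) 0 - v.getD (2*i+1) 0) := by
    refine List.map_congr_left ?_
    intro a ha
    rw [List.mem_range] at ha
    rw [getD_take _ _ _ (by omega), getD_take _ _ _ (by omega)]
  rw [hmap1, hmap2, List.getD_eq_getElem?_getD]
  by_cases h1 : k < N
  · rw [List.getElem?_append_left (by simp [List.length_append]; omega),
        List.getElem?_append_left (by simp; omega),
        mapRange_getElem? N k _ h1]
    simp [h1]
  · by_cases h2 : k < 2*N
    · rw [List.getElem?_append_left (by simp [List.length_append]; omega),
          List.getElem?_append_right (by simp; omega)]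
      simp only [List.length_map, List.length_range]
      rw [mapRange_getElem? N (k-N) _ (by omega)]
      simp [h1, h2]
    · rw [List.getElem?_append_right (by simp [List.length_append]; omega)]
      simp only [List.length_append, List.length_map, List.length_range]
      rw [List.getElem?_drop]
      rw [show 2*N + (k - (N+N)) = k from by omega]
      simp [List.getD_eq_getElem?_getD, h1, h2]

theorem aRowStep_length (N : Nat) (row : List Int) (h : 2*N ≤ row.length) :
    (aRowStep N row).length = row.length :=
  (aRowStep_aux N row h N (le_refl N)).1

theorem aRowStep_getD (N : Nat) (row : List Int) (h : 2*N ≤ row.length) (k : Nat) :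
    (aRowStep N row).getD k 0 =
      if k < N then row.getD (2*k) 0 + row.getD (2*k+1) 0
      else if N ≤ k ∧ k < N + N then row.getD (2*(k-N)) 0 - row.getD (2*(k-N)+1) 0
      else row.getD k 0 :=
  (aRowStep_aux N row h N (le_refl N)).2 k

theorem getD_eq_getElem {α : Type} (y : α) (l : List α) (k : Nat) (hk : k < l.length) :
    l.getD k y = l[k] := by
  rw [List.getD_eq_getElem?_getD, List.getElem?_eq_getElem hk]; rfl

theorem step_eq (N : Nat) (v : List Int) (h : 2*N ≤ v.length) :
    aRowStep N v = bStep N v := by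
  apply List.ext_getElem (by rw [aRowStep_length N v h, bStep_length N v h])
  intro k hk1 hk2
  have hkv : k < v.length := by rw [aRowStep_length N v h] at hk1; exact hk1
  rw [← getD_eq_getElem 0 _ _ hk1, ← getD_eq_getElem 0 _ _ hk2,
      aRowStep_getD N v h k, bStep_getD N v h k hkv]
  split_ifs <;> first | rfl | omega

theorem min?_replicate (n : Nat) (m : Nat) (h : 0 < n) :
    ((List.replicate n m).min?).getD 0 = m := by
  induction n with
  | zero => omega
  | succ n ih =>
    rcases Nat.eq_zero_or_pos n with h0 | h0
    · subst h0; simp [List.replicate]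
    · have := ih h0
      rw [List.replicate_succ]
      cases hmin : (List.replicate n m).min? with
      | none => simp [List.min?_eq_none_iff] at hmin; omega
      | some x =>
        have hx : x = m := by rw [hmin] at this; simpa using this
        subst hx
        simp [List.min?_cons, hmin]

theorem map_length_replicate (d : List (List Int)) (m : Nat) (hm : ∀ r ∈ d, r.length = m) :
    d.map List.length = List.replicate d.length m := by
  induction d with
  | nil => simp
  | cons r d ih =>
    simp only [List.map_cons, List.length_cons, List.replicate_succ]
    rw [hm r List.mem_cons_self, ih (fun r hr => hm r (List.mem_cons_of_mem _ hr))]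

theorem transpose_length (d : List (List Int)) (m : Nat) (hm : ∀ r ∈ d, r.length = m)
    (hne : d ≠ []) : (pyTranspose d).length = m := by
  unfold pyTranspose
  rw [map_length_replicate d m hm, min?_replicate _ _ (by cases d <;> simp_all)]
  simp

theorem transpose_getD (d : List (List Int)) (m : Nat) (hm : ∀ r ∈ d, r.length = m)
    (hne : d ≠ []) (i : Nat) (hi : i < m) :
    (pyTranspose d).getD i [] = d.map (fun r => r.getD i 0) := by
  unfold pyTranspose
  rw [map_length_replicate d m hm, min?_replicate _ _ (by cases d <;> simp_all)]
  rw [List.getD_eq_getElem?_getD, List.getElem?_map, List.getElem?_range hi]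
  rfl

theorem transpose_eq (d : List (List Int)) (m : Nat) (hm : ∀ r ∈ d, r.length = m)
    (hne : d ≠ []) :
    pyTranspose d = (List.range m).map (fun i => d.map (fun r => r.getD i 0)) := by
  unfold pyTranspose
  rw [map_length_replicate d m hm, min?_replicate _ _ (by cases d <;> simp_all)]

theorem getD_map_getD (d : List (List Int)) (i k : Nat) (hk : k < d.length) :
    (d.map (fun r => r.getD i 0)).getD k 0 = (d.getD k []).getD i 0 := by
  rw [List.getD_eq_getElem?_getD, List.getElem?_map, List.getElem?_eq_getElem hk]
  simp [List.getD_eq_getElem?_getD, List.getElem?_eq_getElem hk]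

theorem map_range_getD (r : List Int) (m : Nat) (h : r.length = m) :
    (List.range m).map (fun i => r.getD i 0) = r := by
  apply List.ext_getElem (by simp [h])
  intro k hk1 hk2
  simp only [List.getElem_map, List.getElem_range]
  exact getD_eq_getElem 0 r k hk2

theorem headD_length (d : List (List Int)) (m : Nat) (hm : ∀ r ∈ d, r.length = m)
    (hne : d ≠ []) : (d.headD []).length = m := by
  cases d with
  | nil => simp_all
  | cons r t => exact hm r List.mem_cons_self

theorem getD_mem (d : List (List Int)) (j : Nat) (hj : j < d.length) : d.getD j [] ∈ d := by
  rw [List.getD_eq_getElem?_getD, List.getElem?_eq_getElem hj]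
  exact List.getElem_mem hj

theorem cols_eq (d : List (List Int)) (N m : Nat) (hm : ∀ r ∈ d, r.length = m)
    (hm0 : 0 < m) (hN1 : 0 < N) (hN2 : 2*N ≤ d.length) :
    pyTranspose ((pyTranspose d).map (aRowStep N)) = bCols d N := by
  have hne : d ≠ [] := by intro h; subst h; simp at hN2; omega
  have hTeq := transpose_eq d m hm hne
  have hX : (pyTranspose d).map (aRowStep N)
      = (List.range m).map (fun i => aRowStep N (d.map (fun r => r.getD i 0))) := by
    rw [hTeq, List.map_map]; rfl
  have hcol_len : ∀ i : Nat, (d.map (fun r => r.getD i 0)).length = d.length := by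
    intro i; simp
  have hX_rows : ∀ r ∈ (pyTranspose d).map (aRowStep N), r.length = d.length := by
    rw [hX]
    intro r hr
    obtain ⟨i, _, rfl⟩ := List.mem_map.mp hr
    rw [aRowStep_length N _ (by rw [hcol_len]; exact hN2), hcol_len]
  have hXne : (pyTranspose d).map (aRowStep N) ≠ [] := by
    rw [hX]
    cases hm' : List.range m with
    | nil => rw [List.range_eq_nil] at hm'; omega
    | cons a t => simp
  -- both sides have length d.length
  apply List.ext_getElem
  · rw [transpose_length _ d.length hX_rows hXne]
    unfold bCols; simp
  intro j hj1 hj2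
  have hjn : j < d.length := by
    rw [transpose_length _ d.length hX_rows hXne] at hj1; exact hj1
  rw [← getD_eq_getElem [] _ _ hj1, ← getD_eq_getElem [] _ _ hj2]
  rw [transpose_getD _ d.length hX_rows hXne j hjn]
  have hRg : (bCols d N).getD j [] =
      (if j < N then
        (List.range (d.headD []).length).map
          (fun i => (d.getD (2*j) []).getD i 0 + (d.getD (2*j+1) []).getD i 0)
      else if j < 2*N then
        (List.range (d.headD []).length).map
          (fun i => (d.getD (2*(j-N)) []).getD i 0 - (d.getD (2*(j-N)+1) []).getD i 0)
      else d.getD j []) := by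
    unfold bCols
    rw [List.getD_eq_getElem?_getD, List.getElem?_map, List.getElem?_range hjn]
    rfl
  rw [hRg, hX, List.map_map, headD_length d m hm hne]
  by_cases h1 : j < N
  · rw [if_pos h1]
    refine List.map_congr_left ?_
    intro i hi
    rw [List.mem_range] at hi
    have hcl : 2*N ≤ (d.map (fun r => r.getD i 0)).length := by rw [hcol_len]; exact hN2
    simp only [Function.comp]
    rw [aRowStep_getD N _ hcl j, if_pos h1,
        getD_map_getD d i (2*j) (by omega), getD_map_getD d i (2*j+1) (by omega)]
  · by_cases h2 : j < 2*N
    · rw [if_neg h1, if_pos h2]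
      refine List.map_congr_left ?_
      intro i hi
      rw [List.mem_range] at hi
      have hcl : 2*N ≤ (d.map (fun r => r.getD i 0)).length := by rw [hcol_len]; exact hN2
      simp only [Function.comp]
      rw [aRowStep_getD N _ hcl j, if_neg h1, if_pos (by omega : N ≤ j ∧ j < N + N),
          getD_map_getD d i (2*(j-N)) (by omega), getD_map_getD d i (2*(j-N)+1) (by omega)]
    · rw [if_neg h1, if_neg h2]
      have hrow_len : (d.getD j []).length = m := hm _ (getD_mem d j hjn)
      conv_rhs => rw [← map_range_getD (d.getD j []) m hrow_len]
      refine List.map_congr_left ?_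
      intro i hi
      rw [List.mem_range] at hi
      have hcl : 2*N ≤ (d.map (fun r => r.getD i 0)).length := by rw [hcol_len]; exact hN2
      simp only [Function.comp]
      rw [aRowStep_getD N _ hcl j, if_neg h1, if_neg (by omega : ¬ (N ≤ j ∧ j < N + N)),
          getD_map_getD d i j hjn]

theorem bCols_length (rows : List (List Int)) (N : Nat) :
    (bCols rows N).length = rows.length := by
  unfold bCols; simp

theorem bCols_rows (rows : List (List Int)) (N m : Nat)
    (hm : ∀ r ∈ rows, r.length = m) (hne : rows ≠ []) :
    ∀ r ∈ bCols rows N, r.length = m := by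
  intro r hr
  unfold bCols at hr
  obtain ⟨j, hj, rfl⟩ := List.mem_map.mp hr
  rw [List.mem_range] at hj
  split_ifs
  · simp only [List.length_map, List.length_range]
    exact headD_length rows m hm hne
  · simp only [List.length_map, List.length_range]
    exact headD_length rows m hm hne
  · exact hm _ (getD_mem rows j hj)

theorem loop_eq (N : Nat) (d : List (List Int)) (m : Nat)
    (hm : ∀ r ∈ d, r.length = m) (hrm : 2*N ≤ m) (hrn : 2*N ≤ d.length) :
    aLoop d N = bLoop d N := by
  induction N using Nat.strong_induction_on generalizing d with
  | _ N ih =>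
    rw [aLoop, bLoop]
    by_cases h : 1 < N
    · simp only [if_pos h]
      have hd1 : ∀ r ∈ d.map (aRowStep N), r.length = m := by
        intro r hr
        obtain ⟨r0, hr0, rfl⟩ := List.mem_map.mp hr
        rw [aRowStep_length N r0 (by rw [hm r0 hr0]; exact hrm), hm r0 hr0]
      have hmap : d.map (aRowStep N) = d.map (bStep N) := by
        refine List.map_congr_left ?_
        intro r hr
        exact step_eq N r (by rw [hm r hr]; exact hrm)
      rw [cols_eq (d.map (aRowStep N)) N m hd1 (by omega) (by omega) (by simp; omega)]
      rw [hmap]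
      have hd1' : ∀ r ∈ d.map (bStep N), r.length = m := by rw [← hmap]; exact hd1
      have hne1 : d.map (bStep N) ≠ [] := by
        cases d with
        | nil => simp at hrn; omega
        | cons r t => simp
      refine ih (N/2) (by omega) (bCols (d.map (bStep N)) N)
        (bCols_rows _ N m hd1' hne1) (by omega) ?_
      rw [bCols_length]; simp; omega
    · simp [h]

-- ===== VERDICT (by name: the statement is the Claim_ definition above) =====
theorem wavelet2d_spec : Claim_equal_wavelet2d := by
  intro data _ hpre
  unfold Spec_wavelet2d wavelet2d wavelet2d_alt
  by_cases h4 : 4 ≤ data.length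
  · obtain ⟨hrect, hlen⟩ := hpre h4
    exact loop_eq _ _ _ hrect hlen (by omega)
  · rw [aLoop, bLoop]
    have : ¬ 1 < data.length / 2 := by omega
    simp [this]
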